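-- pv_equiv track=rewrite | github.com/fmohr/diffeq | autode/optimizers.py | get_variables_in_func_str
-- ===== SOURCE A (Python) =====
-- def is_number(s):
--     try:
--         float(s)
--         return True
--     except ValueError:
--         return False
--
-- def get_variables_in_func_str(string_descr):
--
--     varset = set()
--     arithmetics = ["**", "*", "/", "+", "-"]
--
--     def resolve_symbols_rec(string, sym_index, varset):
--         if sym_index == len(arithmetics):
--             varset.add(string)
--
--         else:
--             sym = arithmetics[sym_index]
--             if sym in string:
--                 components = string.split(sym)
--                 for c in components:
--                     resolve_symbols_rec(c, sym_index + 1, varset)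
--             else:
--                 resolve_symbols_rec(string, sym_index + 1, varset)
--
--
--     # clean original string by removing parantheses, which are not relevant for this question
--     string_descr = string_descr.replace("(", "").replace(")", "")
--
--     # get symbols
--     resolve_symbols_rec(string_descr, 0, varset)
--
--     # clean symbols and eliminate numbers
--     varset = {v.strip() for v in varset if v.strip() != "" and not is_number(v.strip())}
--
--     # return
--     return varset
-- ===== SOURCE B (Python) =====
-- import re
--
-- # float()-literal recognizer for already-extracted tokens: one anchored regex
-- # (sign, then inf/infinity/nan case-insensitively, or an underscore-grouped
-- # decimal mantissa with optional exponent), instead of try/except float().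
-- _FLOAT_RE = re.compile(
--     r"[+-]?(?:"
--     r"(?:\d(?:_?\d)*(?:\.(?:\d(?:_?\d)*)?)?|\.\d(?:_?\d)*)(?:[eE][+-]?\d(?:_?\d)*)?"
--     r"|inf(?:inity)?|nan"
--     r")",
--     re.IGNORECASE,
-- )
--
--
-- def _is_float_literal(tok):
--     return _FLOAT_RE.fullmatch(tok) is not None
--
--
-- def get_variables_in_func_str(string_descr):
--     # single pass with a sentinel operator appended: every operator character
--     # flushes the current token; parentheses are skipped as they are read
--     seen = set()
--     buf = []
--     for ch in string_descr + "*":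
--         if ch in "*/+-":
--             tok = "".join(buf).strip()
--             buf = []
--             if tok != "" and not _is_float_literal(tok):
--                 seen.add(tok)
--         elif ch not in "()":
--             buf.append(ch)
--     return seen
-- ===== Notes on version B (the rewrite author's own statement) =====
-- stated objective: alternative
-- what changed: A's nested recursion that splits on each of the five operator strings in turn (after two replace passes deleting parentheses) is replaced by one left-to-right pass with a sentinel operator appended: parentheses are skipped inline, each operator character flushes the current stripped token, and the try/except-float() number test is replaced by a single anchored regex recognizing exactly the float() literals.
import Mathlib
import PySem

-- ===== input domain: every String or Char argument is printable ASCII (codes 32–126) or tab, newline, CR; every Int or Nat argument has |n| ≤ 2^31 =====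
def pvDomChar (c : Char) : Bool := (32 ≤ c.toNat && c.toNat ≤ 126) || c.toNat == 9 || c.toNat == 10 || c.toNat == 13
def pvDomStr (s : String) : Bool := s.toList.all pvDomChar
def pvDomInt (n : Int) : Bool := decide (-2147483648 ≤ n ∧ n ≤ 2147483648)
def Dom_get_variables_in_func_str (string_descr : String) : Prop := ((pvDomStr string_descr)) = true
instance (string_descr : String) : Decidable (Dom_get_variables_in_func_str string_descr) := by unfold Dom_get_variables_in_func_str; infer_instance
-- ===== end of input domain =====

-- B replaces A's operator-by-operator recursive splitting (after two replace passes) with one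
-- sentinel-terminated scan that skips parentheses inline and tests tokens with a regex-style
-- float-literal recognizer instead of try/except float() (alternative decomposition; return-value equivalence).

-- ===== PORT A =====
-- is_number: float()-acceptance recognizer, A's try/except-float helper (exact on the ASCII domain)
def pvDigit (c : Char) : Bool := '0' ≤ c && c ≤ '9'
def pvUIntTail : List Char → Bool
  | [] => true
  | '_' :: rest =>
    match rest with
    | [] => false
    | c :: r2 => pvDigit c && pvUIntTail r2
  | c :: rest => pvDigit c && pvUIntTail rest
def pvUInt : List Char → Bool
  | [] => false
  | c :: rest => pvDigit c && pvUIntTail rest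
def pvSplitOnce (p : Char → Bool) : List Char → Option (List Char × List Char)
  | [] => none
  | c :: rest => if p c then some ([], rest) else (pvSplitOnce p rest).map (fun r => (c :: r.1, r.2))
def pvMant (cs : List Char) : Bool :=
  match pvSplitOnce (· == '.') cs with
  | none => pvUInt cs
  | some (a, b) => !(a.isEmpty && b.isEmpty) && (a.isEmpty || pvUInt a) && (b.isEmpty || pvUInt b)
def pvDropSign : List Char → List Char
  | [] => []
  | c :: rest => if c == '+' || c == '-' then rest else c :: rest
def pvNum (cs : List Char) : Bool :=
  (PySem.Chars.lower cs == "inf".toList || PySem.Chars.lower cs == "infinity".toList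
    || PySem.Chars.lower cs == "nan".toList)
  || match pvSplitOnce (fun c => c == 'e' || c == 'E') cs with
     | none => pvMant cs
     | some (m, ex) => pvMant m && pvUInt (pvDropSign ex)
def is_number (cs : List Char) : Bool := pvNum (pvDropSign (PySem.Chars.strip cs))

-- string_descr.replace("(", "").replace(")", "")  (strings handled as code-point lists)
def pvClean (s : String) : List Char :=
  (PySem.Str.replace (PySem.Str.replace s "(" "") ")" "").toList

def pvArith : List (List Char) := [['*','*'], ['*'], ['/'], ['+'], ['-']]

def pvResolveRec : List (List Char) → List Char → PySem.Set (List Char) → PySem.Set (List Char)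
  | [], s, vs => PySem.Set.add vs s
  | sym :: rest, s, vs =>
    if PySem.Chars.isIn sym s then
      (PySem.Chars.splitOn s sym).foldl (fun a c => pvResolveRec rest c a) vs
    else pvResolveRec rest s vs

def get_variables_in_func_str (string_descr : String) : List String :=
  let cleaned := pvClean string_descr
  let varset := pvResolveRec pvArith cleaned PySem.Set.empty
  (varset.foldl (fun acc v =>
      let w := PySem.Chars.strip v
      if w ≠ [] ∧ is_number w = false then PySem.Set.add acc w else acc)
    PySem.Set.empty).map String.ofList

-- ===== PORT B =====
-- hand port of Source B's anchored regex _FLOAT_RE (no regex engine in Lean): each regex piece becomes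
-- one consuming function; exact on the ASCII domain, greedy = deterministic here since no
-- alternative of the pattern can continue where a digit run stops.
def bDig (c : Char) : Bool := 48 ≤ c.toNat && c.toNat ≤ 57     -- \d (ASCII)
def bRunT : List Char → List Char                               -- (_?\d)* : consume, return the rest
  | [] => []
  | c :: r =>
    if bDig c then bRunT r
    else if c = '_' then
      match r with
      | d :: r2 => if bDig d then bRunT r2 else c :: d :: r2
      | [] => [c]
    else c :: r
def bRun : List Char → Option (List Char)                       -- \d(_?\d)* : none = no match
  | [] => none
  | c :: r => if bDig c then some (bRunT r) else none
def bSkipSign : List Char → List Char                           -- [+-]?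
  | [] => []
  | c :: r => if c = '+' ∨ c = '-' then r else c :: r
def bExpOk : List Char → Bool                                   -- (?:[eE][+-]?\d(_?\d)*)? then end
  | [] => true
  | c :: r => if c = 'e' ∨ c = 'E' then bRun (bSkipSign r) == some [] else false
def bMantissa (t : List Char) : Option (List Char) :=           -- \d(_?\d)*(\.(\d(_?\d)*)?)? | \.\d(_?\d)*
  match bRun t with
  | some r =>
    match r with
    | '.' :: r2 =>
      match bRun r2 with
      | some r3 => some r3
      | none => some r2
    | _ => some r
  | none =>
    match t with
    | '.' :: r2 => bRun r2
    | _ => none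
def bNumCore (t : List Char) : Bool :=
  match bMantissa t with
  | some r => bExpOk r
  | none => false
def bFoldCase (c : Char) : Char :=                              -- re.IGNORECASE (ASCII)
  if 65 ≤ c.toNat ∧ c.toNat ≤ 90 then Char.ofNat (c.toNat + 32) else c
def bIsFloat (tok : List Char) : Bool :=                        -- _FLOAT_RE.fullmatch(tok) is not None
  bNumCore (bSkipSign tok)
    || (bSkipSign tok).map bFoldCase == "inf".toList
    || (bSkipSign tok).map bFoldCase == "infinity".toList
    || (bSkipSign tok).map bFoldCase == "nan".toList

def get_variables_in_func_str_alt (string_descr : String) : List String :=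
  let scanned := (string_descr.toList ++ ['*']).foldl           -- for ch in string_descr + "*"
    (fun (z : PySem.Set (List Char) × List Char) c =>
      if c = '*' ∨ c = '/' ∨ c = '+' ∨ c = '-' then
        let tok := PySem.Chars.strip z.2
        (if tok ≠ [] ∧ bIsFloat tok = false then PySem.Set.add z.1 tok else z.1, [])
      else if c = '(' ∨ c = ')' then z
      else (z.1, z.2 ++ [c]))
    (PySem.Set.empty, [])
  scanned.1.map String.ofList

-- ===== PRECONDITION & SPEC =====
def Spec_get_variables_in_func_str (string_descr : String) (out : List String) : Prop := out = get_variables_in_func_str_alt string_descr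
instance (string_descr : String) (out : List String) : Decidable (Spec_get_variables_in_func_str string_descr out) := by unfold Spec_get_variables_in_func_str; infer_instance

-- ===== CLAIM (what is proved, stated in full; the proofs are below) =====
def Claim_equal_get_variables_in_func_str : Prop := ∀ (string_descr : String), Dom_get_variables_in_func_str string_descr → Spec_get_variables_in_func_str string_descr (get_variables_in_func_str string_descr)


-- ===== LEMMAS AND PROOFS =====

-- prepend a character to the first piece of a split-result
def consH (c : Char) : List (List Char) → List (List Char)
  | [] => [[c]]
  | h :: t => (c :: h) :: t

-- prepend a prefix to the first piece
def preH (pre : List Char) : List (List Char) → List (List Char)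
  | [] => [pre]
  | h :: t => (pre ++ h) :: t

-- split on a character predicate
def psplit (p : Char → Prop) [DecidablePred p] : List Char → List (List Char)
  | [] => [[]]
  | c :: rest => if p c then [] :: psplit p rest else consH c (psplit p rest)

-- Python str.split(sep) for nonempty sep, in structural form
def mySplit (sep : List Char) (l : List Char) : List (List Char) :=
  match l with
  | [] => [[]]
  | c :: rest =>
    if sep.isPrefixOf (c :: rest) then
      [] :: mySplit sep (rest.drop (sep.length - 1))
    else consH c (mySplit sep rest)
  termination_by l.length
  decreasing_by
  · simp only [List.length_cons]
    have : (rest.drop (sep.length - 1)).length ≤ rest.length := by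
      simp
    omega
  · simp

-- the flat sequence of raw tokens A's recursion adds to the set, in order
def toksA : List (List Char) → List Char → List (List Char)
  | [], s => [s]
  | sym :: rest, s => (mySplit sym s).flatMap (toksA rest)

-- the strip-and-flush step and the strip-filter comprehension step, for an arbitrary recognizer q
def flushOf (q : List Char → Bool) (out : PySem.Set (List Char)) (cur : List Char) :
    PySem.Set (List Char) :=
  if PySem.Chars.strip cur ≠ [] ∧ q (PySem.Chars.strip cur) = false
  then PySem.Set.add out (PySem.Chars.strip cur) else out

def pickOf (q : List Char → Bool) (v : List Char) : Option (List Char) :=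
  if PySem.Chars.strip v ≠ [] ∧ q (PySem.Chars.strip v) = false
  then some (PySem.Chars.strip v) else none

theorem consH_ne_nil (c : Char) (M : List (List Char)) : consH c M ≠ [] := by
  cases M <;> simp [consH]

theorem psplit_ne_nil (p : Char → Prop) [DecidablePred p] (l : List Char) : psplit p l ≠ [] := by
  cases l with
  | nil => simp [psplit]
  | cons c rest =>
    rw [psplit]
    split
    · simp
    · exact consH_ne_nil _ _

theorem mySplit_ne_nil (sep l : List Char) : mySplit sep l ≠ [] := by
  cases l with
  | nil => simp [mySplit]
  | cons c rest =>
    rw [mySplit]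
    split
    · simp
    · exact consH_ne_nil _ _

theorem consH_cons (c : Char) (h : List Char) (t : List (List Char)) :
    consH c (h :: t) = (c :: h) :: t := rfl

theorem consH_append (c : Char) (A B : List (List Char)) (hA : A ≠ []) :
    consH c (A ++ B) = consH c A ++ B := by
  cases A with
  | nil => exact absurd rfl hA
  | cons h t => rfl

theorem preH_nil_eq (M : List (List Char)) (hM : M ≠ []) : preH [] M = M := by
  cases M with
  | nil => exact absurd rfl hM
  | cons h t => simp [preH]

theorem preH_consH (pre : List Char) (c : Char) (M : List (List Char)) :
    preH pre (consH c M) = preH (pre ++ [c]) M := by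
  cases M <;> simp [preH, consH]

theorem go_spec (sep : List Char) (hsep : sep ≠ []) :
    ∀ (fuel : Nat) (l cur : List Char) (acc : List (List Char)), l.length < fuel →
      PySem.Chars.splitOn.go sep fuel l cur acc = acc.reverse ++ preH cur.reverse (mySplit sep l) := by
  intro fuel
  induction fuel with
  | zero => intro l cur acc h; omega
  | succ fuel ih =>
    intro l cur acc h
    cases l with
    | nil =>
      have e : PySem.Chars.splitOn.go sep (fuel+1) [] cur acc = (cur.reverse :: acc).reverse := rfl
      rw [e, mySplit]
      simp [preH]
    | cons c rest =>
      have e : PySem.Chars.splitOn.go sep (fuel+1) (c :: rest) cur acc =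
          if sep.isPrefixOf (c :: rest) then
            PySem.Chars.splitOn.go sep fuel ((c :: rest).drop sep.length) [] (cur.reverse :: acc)
          else PySem.Chars.splitOn.go sep fuel rest (c :: cur) acc := rfl
      rw [e]
      have hsl : 1 ≤ sep.length := List.length_pos_iff.mpr hsep
      by_cases hp : sep.isPrefixOf (c :: rest)
      · rw [if_pos hp]
        have hlen : ((c :: rest).drop sep.length).length < fuel := by
          simp only [List.length_drop, List.length_cons] at *
          omega
        rw [ih _ [] (cur.reverse :: acc) hlen, mySplit, if_pos hp]
        have hdrop : (c :: rest).drop sep.length = rest.drop (sep.length - 1) := by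
          cases sep with
          | nil => exact absurd rfl hsep
          | cons a as => simp
        rw [hdrop]
        simp only [List.reverse_nil]
        rw [preH_nil_eq _ (mySplit_ne_nil _ _)]
        simp [preH]
      · rw [if_neg hp, ih rest (c :: cur) acc (by simp only [List.length_cons] at h; omega),
          mySplit, if_neg hp, preH_consH]
        simp

theorem splitOn_eq (s sep : List Char) (hsep : sep ≠ []) :
    PySem.Chars.splitOn s sep = mySplit sep s := by
  have e : PySem.Chars.splitOn s sep = PySem.Chars.splitOn.go sep (s.length + 1) s [] [] := rfl
  rw [e, go_spec sep hsep _ _ _ _ (by omega)]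
  simp [preH_nil_eq _ (mySplit_ne_nil _ _)]

theorem mySplit_single (c : Char) (l : List Char) :
    mySplit [c] l = psplit (fun x => x = c) l := by
  induction l with
  | nil => simp [mySplit, psplit]
  | cons x rest ih =>
    rw [mySplit, psplit]
    by_cases hx : x = c
    · rw [if_pos (by simp [List.isPrefixOf, hx]), if_pos hx]
      rw [show ([c].length - 1 : Nat) = 0 from rfl, List.drop_zero, ih]
    · rw [if_neg (by
        intro hp
        simp [List.isPrefixOf] at hp
        exact hx hp.symm), if_neg hx, ih]

theorem mySplit_not_isIn (sep l : List Char) (h : PySem.Chars.isIn sep l = false) :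
    mySplit sep l = [l] := by
  rw [PySem.Chars.isIn_eq_false_iff] at h
  induction l with
  | nil => simp [mySplit]
  | cons x rest ih =>
    rw [mySplit]
    rw [if_neg (by
      intro hp
      exact h ((List.isPrefixOf_iff_prefix.mp hp).isInfix))]
    rw [ih (by
      intro hi
      exact h (hi.trans (List.suffix_cons x rest).isInfix))]
    rfl

theorem foldl_flatMap {α β γ : Type} (g : α → List β) (f : γ → β → γ) (a : γ) (L : List α) :
    (L.flatMap g).foldl f a = L.foldl (fun a x => (g x).foldl f a) a := by
  induction L generalizing a with
  | nil => rfl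
  | cons x t ih => simp [List.flatMap_cons, List.foldl_append, ih]

theorem resolve_toks : ∀ (syms : List (List Char)), (∀ sym ∈ syms, sym ≠ []) →
    ∀ (s : List Char) (vs : PySem.Set (List Char)),
    pvResolveRec syms s vs = (toksA syms s).foldl PySem.Set.add vs := by
  intro syms
  induction syms with
  | nil => intro _ s vs; rfl
  | cons sym rest ih =>
    intro hne s vs
    have hsym : sym ≠ [] := hne sym List.mem_cons_self
    have hrest : ∀ x ∈ rest, x ≠ [] := fun x hx => hne x (List.mem_cons_of_mem _ hx)
    rw [pvResolveRec, toksA]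
    by_cases hin : PySem.Chars.isIn sym s
    · rw [if_pos hin, splitOn_eq s sym hsym, foldl_flatMap]
      have : (fun (a : PySem.Set (List Char)) c => pvResolveRec rest c a)
          = (fun a x => (toksA rest x).foldl PySem.Set.add a) :=
        funext fun a => funext fun c => ih hrest c a
      rw [this]
    · rw [if_neg hin, mySplit_not_isIn sym s (by simpa using hin)]
      simp only [List.flatMap_cons, List.flatMap_nil, List.append_nil]
      exact ih hrest s vs

theorem foldl_flush (q : List Char → Bool) (L : List (List Char)) (acc : PySem.Set (List Char)) :
    L.foldl (flushOf q) acc = (L.filterMap (pickOf q)).foldl PySem.Set.add acc := by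
  induction L generalizing acc with
  | nil => rfl
  | cons v t ih =>
    simp only [List.foldl_cons, List.filterMap_cons]
    by_cases hc : PySem.Chars.strip v ≠ [] ∧ q (PySem.Chars.strip v) = false
    · rw [show flushOf q acc v = PySem.Set.add acc (PySem.Chars.strip v) by
          simp only [flushOf]; rw [if_pos hc],
        show pickOf q v = some (PySem.Chars.strip v) by simp only [pickOf]; rw [if_pos hc], ih]
      rfl
    · rw [show flushOf q acc v = acc by simp only [flushOf]; rw [if_neg hc],
        show pickOf q v = none by simp only [pickOf]; rw [if_neg hc], ih]

theorem ofList_append (A B : List (List Char)) :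
    PySem.Set.ofList (A ++ B) = B.foldl PySem.Set.add (PySem.Set.ofList A) := by
  rw [PySem.Set.ofList_eq_foldl, PySem.Set.ofList_eq_foldl, List.foldl_append]

theorem ofList_filterMap_ofList (f : List Char → Option (List Char)) (L : List (List Char)) :
    PySem.Set.ofList (List.filterMap f (PySem.Set.ofList L)) = PySem.Set.ofList (L.filterMap f) := by
  induction L using List.reverseRecOn with
  | nil => rfl
  | append_singleton L x ih =>
    have hof : PySem.Set.ofList (L ++ [x]) = PySem.Set.add (PySem.Set.ofList L) x :=
      ofList_append L [x]
    rw [hof, List.filterMap_append, ofList_append]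
    by_cases hx : x ∈ L
    · rw [PySem.Set.add_of_mem ((PySem.Set.mem_ofList L x).mpr hx), ih]
      cases hfx : f x with
      | none => simp [hfx]
      | some w =>
        simp only [hfx, List.filterMap_cons, List.filterMap_nil, List.foldl_cons, List.foldl_nil]
        exact (PySem.Set.add_of_mem ((PySem.Set.mem_ofList _ _).mpr
          (List.mem_filterMap.mpr ⟨x, hx, hfx⟩))).symm
    · rw [PySem.Set.add_of_not_mem (fun hm => hx ((PySem.Set.mem_ofList L x).mp hm)),
        List.filterMap_append, ofList_append, ih]

theorem pickOf_nil (q : List Char → Bool) : pickOf q [] = none := by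
  simp [pickOf, PySem.Chars.strip, PySem.Chars.lstrip, PySem.Chars.rstrip]

theorem filterMap_pick_filter (q : List Char → Bool) (L : List (List Char)) :
    L.filterMap (pickOf q) = (L.filter (· ≠ [])).filterMap (pickOf q) := by
  induction L with
  | nil => rfl
  | cons x t ih =>
    by_cases hx : x = []
    · subst hx
      rw [List.filter_cons_of_neg (by simp), List.filterMap_cons, pickOf_nil, ih]
    · rw [List.filter_cons_of_pos (by simp [hx]), List.filterMap_cons, List.filterMap_cons, ih]

theorem loopB (p : Char → Prop) [DecidablePred p] (f : PySem.Set (List Char) → List Char → PySem.Set (List Char)) :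
    ∀ (l : List Char) (out : PySem.Set (List Char)) (cur : List Char),
      (let r := l.foldl
        (fun (st : PySem.Set (List Char) × List Char) ch =>
          if p ch then (f st.1 st.2, ([] : List Char)) else (st.1, st.2 ++ [ch]))
        (out, cur);
       f r.1 r.2) = (preH cur (psplit p l)).foldl f out := by
  intro l out cur
  induction l generalizing out cur with
  | nil => simp [psplit, preH]
  | cons c l ih =>
    simp only [List.foldl_cons]
    rw [psplit]
    by_cases hc : p c
    · rw [if_pos hc, if_pos hc]
      have hM := psplit_ne_nil p l
      cases hMc : psplit p l with
      | nil => exact absurd hMc hM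
      | cons h t =>
        simp only [preH, List.foldl_cons, List.append_nil]
        have := ih (f out cur) []
        rw [hMc] at this
        simpa [preH] using this
    · rw [if_neg hc, if_neg hc, preH_consH]
      exact ih out (cur ++ [c])

theorem psplit_congr (p q : Char → Prop) [DecidablePred p] [DecidablePred q]
    (h : ∀ c, p c ↔ q c) (l : List Char) : psplit p l = psplit q l := by
  induction l with
  | nil => rfl
  | cons c rest ih =>
    rw [psplit, psplit, ih]
    by_cases hc : p c
    · rw [if_pos hc, if_pos ((h c).mp hc)]
    · rw [if_neg hc, if_neg (fun hq => hc ((h c).mpr hq))]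

theorem flatMap_psplit_ne_nil (q : Char → Prop) [DecidablePred q] (L : List (List Char))
    (hL : L ≠ []) : L.flatMap (psplit q) ≠ [] := by
  cases L with
  | nil => exact absurd rfl hL
  | cons h t =>
    simp only [List.flatMap_cons]
    intro he
    exact psplit_ne_nil q h (List.append_eq_nil_iff.mp he).1

theorem psplit_compose (p q : Char → Prop) [DecidablePred p] [DecidablePred q] (l : List Char) :
    (psplit p l).flatMap (psplit q) = psplit (fun c => p c ∨ q c) l := by
  induction l with
  | nil => simp [psplit]
  | cons c rest ih =>
    rw [psplit, psplit]
    obtain ⟨h, t, hM⟩ : ∃ h t, psplit p rest = h :: t := by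
      cases hMc : psplit p rest with
      | nil => exact absurd hMc (psplit_ne_nil p rest)
      | cons h t => exact ⟨h, t, rfl⟩
    by_cases hp : p c
    · rw [if_pos hp, if_pos (Or.inl hp)]
      simp only [List.flatMap_cons, ih]
      rfl
    · by_cases hq : q c
      · rw [if_neg hp, if_pos (Or.inr hq), hM, consH_cons]
        simp only [List.flatMap_cons]
        rw [psplit, if_pos hq]
        rw [← ih, hM]
        simp [List.flatMap_cons]
      · rw [if_neg hp, if_neg (fun hor => hor.elim hp hq), hM, consH_cons]
        simp only [List.flatMap_cons]
        rw [psplit, if_neg hq, ← ih, hM]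
        simp only [List.flatMap_cons]
        exact (consH_append c _ _ (psplit_ne_nil q h)).symm

theorem filter_flatMap_psplit (q : Char → Prop) [DecidablePred q] (L : List (List Char)) :
    (L.flatMap (psplit q)).filter (· ≠ []) =
      ((L.filter (· ≠ [])).flatMap (fun x => (psplit q x).filter (· ≠ []))) := by
  induction L with
  | nil => rfl
  | cons x t ih =>
    simp only [ne_eq, decide_not] at ih ⊢
    simp only [List.flatMap_cons, List.filter_append, List.filter_cons]
    by_cases hx : x = []
    · subst hx
      simp only [psplit]
      simp [ih]
    · simp only [if_pos (by simp [hx] : (!decide (x = [])) = true)]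
      simp [List.flatMap_cons, ih]

theorem filter_flatMap_congr (q : Char → Prop) [DecidablePred q] (L1 L2 : List (List Char))
    (h : L1.filter (· ≠ []) = L2.filter (· ≠ [])) :
    (L1.flatMap (psplit q)).filter (· ≠ []) = (L2.flatMap (psplit q)).filter (· ≠ []) := by
  rw [filter_flatMap_psplit, filter_flatMap_psplit, h]

theorem filter_eq_of_head?_tail (L1 L2 : List (List Char))
    (h1 : L1 ≠ []) (h2 : L2 ≠ [])
    (hh : L1.head? = L2.head?) (ht : L1.tail.filter (· ≠ []) = L2.tail.filter (· ≠ [])) :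
    L1.filter (· ≠ []) = L2.filter (· ≠ []) := by
  cases L1 with
  | nil => exact absurd rfl h1
  | cons a t1 =>
    cases L2 with
    | nil => exact absurd rfl h2
    | cons b t2 =>
      simp only [List.head?_cons, Option.some.injEq] at hh
      subst hh
      simp only [List.tail_cons, ne_eq, decide_not] at ht
      by_cases hb : a = []
      · simp [hb, ht]
      · simp [hb, ht]

theorem psplit_pos (p : Char → Prop) [DecidablePred p] {c : Char} (hc : p c) (l : List Char) :
    psplit p (c :: l) = [] :: psplit p l := by rw [psplit, if_pos hc]

theorem psplit_neg (p : Char → Prop) [DecidablePred p] {c : Char} (hc : ¬ p c) (l : List Char) :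
    psplit p (c :: l) = consH c (psplit p l) := by rw [psplit, if_neg hc]

theorem starAux : ∀ (n : Nat) (cs : List Char), cs.length ≤ n →
    ((mySplit ['*','*'] cs).flatMap (psplit (fun x => x = '*'))).head?
        = (psplit (fun x => x = '*') cs).head? ∧
    ((mySplit ['*','*'] cs).flatMap (psplit (fun x => x = '*'))).tail.filter (· ≠ [])
        = (psplit (fun x => x = '*') cs).tail.filter (· ≠ []) := by
  intro n
  induction n with
  | zero =>
    intro cs h
    have hcs : cs = [] := List.eq_nil_iff_length_eq_zero.mpr (Nat.le_zero.mp h)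
    subst hcs
    constructor <;> simp [mySplit, psplit]
  | succ n ih =>
    intro cs hlen
    have ihF : ∀ (t : List Char), t.length ≤ n →
        ((mySplit ['*','*'] t).flatMap (psplit (fun x => x = '*'))).filter (· ≠ [])
          = (psplit (fun x => x = '*') t).filter (· ≠ []) := fun t ht =>
      filter_eq_of_head?_tail _ _
        (flatMap_psplit_ne_nil _ _ (mySplit_ne_nil _ _)) (psplit_ne_nil _ _)
        (ih t ht).1 (ih t ht).2
    cases cs with
    | nil => constructor <;> simp [mySplit, psplit]
    | cons c rest =>
      rw [mySplit]
      by_cases hp : ['*','*'].isPrefixOf (c :: rest)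
      · obtain ⟨t, ht⟩ := List.isPrefixOf_iff_prefix.mp hp
        have hct : c = '*' ∧ rest = '*' :: t := by
          have h2 : '*' :: '*' :: t = c :: rest := ht
          exact ⟨(List.cons_eq_cons.mp h2).1.symm, ((List.cons_eq_cons.mp h2).2).symm⟩
        obtain ⟨rfl, rfl⟩ := hct
        have htlen : t.length ≤ n := by
          simp only [List.length_cons] at hlen; omega
        rw [if_pos hp, show (List.length ['*','*'] - 1 : Nat) = 1 from rfl,
          List.drop_succ_cons, List.drop_zero]
        constructor
        · simp only [List.flatMap_cons]
          rw [psplit_pos (fun x => x = '*') rfl, psplit_pos (fun x => x = '*') rfl]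
          simp [psplit]
        · simp only [List.flatMap_cons]
          rw [psplit_pos (fun x => x = '*') rfl, psplit_pos (fun x => x = '*') rfl]
          simp only [psplit, List.cons_append, List.tail_cons, List.nil_append]
          rw [List.filter_cons_of_neg (by simp)]
          exact ihF t htlen
      · rw [if_neg hp]
        have hrlen : rest.length ≤ n := by
          simp only [List.length_cons] at hlen; omega
        obtain ⟨h, t, hM⟩ : ∃ h t, mySplit ['*','*'] rest = h :: t := by
          cases hMc : mySplit ['*','*'] rest with
          | nil => exact absurd hMc (mySplit_ne_nil _ _)
          | cons h t => exact ⟨h, t, rfl⟩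
        obtain ⟨h1, t1, hP1⟩ : ∃ h1 t1, psplit (fun x => x = '*') h = h1 :: t1 := by
          cases hMc : psplit (fun x => x = '*') h with
          | nil => exact absurd hMc (psplit_ne_nil _ _)
          | cons h1 t1 => exact ⟨h1, t1, rfl⟩
        obtain ⟨h2, t2, hP2⟩ : ∃ h2 t2, psplit (fun x => x = '*') rest = h2 :: t2 := by
          cases hMc : psplit (fun x => x = '*') rest with
          | nil => exact absurd hMc (psplit_ne_nil _ _)
          | cons h2 t2 => exact ⟨h2, t2, rfl⟩
        have ihr := ih rest hrlen
        rw [hM] at ihr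
        simp only [List.flatMap_cons] at ihr
        rw [hP1, hP2] at ihr
        simp only [List.cons_append, List.head?_cons, List.tail_cons,
          Option.some.injEq] at ihr
        constructor
        · rw [hM, consH_cons]
          simp only [List.flatMap_cons]
          by_cases hc : c = '*'
          · rw [psplit_pos (fun x => x = '*') hc, psplit_pos (fun x => x = '*') hc]
            simp
          · rw [psplit_neg (fun x => x = '*') hc, psplit_neg (fun x => x = '*') hc, hP1, hP2, consH_cons, consH_cons]
            simp [ihr.1]
        · rw [hM, consH_cons]
          simp only [List.flatMap_cons]
          by_cases hc : c = '*'
          · rw [psplit_pos (fun x => x = '*') hc, psplit_pos (fun x => x = '*') hc]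
            simp only [List.cons_append, List.tail_cons]
            rw [hP1]
            have hgoal : (h1 :: t1) ++ List.flatMap (psplit (fun x => x = '*')) t
                = (mySplit ['*','*'] rest).flatMap (psplit (fun x => x = '*')) := by
              rw [hM]
              simp only [List.flatMap_cons, hP1, List.cons_append]
            rw [hgoal, hP2]
            exact (ihF rest hrlen).trans (by rw [hP2])
          · rw [psplit_neg (fun x => x = '*') hc, psplit_neg (fun x => x = '*') hc, hP1, hP2, consH_cons, consH_cons]
            simp only [List.cons_append, List.tail_cons]
            exact ihr.2

theorem starF (cs : List Char) :
    ((mySplit ['*','*'] cs).flatMap (psplit (fun x => x = '*'))).filter (· ≠ [])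
      = (psplit (fun x => x = '*') cs).filter (· ≠ []) :=
  filter_eq_of_head?_tail _ _
    (flatMap_psplit_ne_nil _ _ (mySplit_ne_nil _ _)) (psplit_ne_nil _ _)
    (starAux cs.length cs le_rfl).1 (starAux cs.length cs le_rfl).2

theorem toks_eq (cs : List Char) :
    (toksA pvArith cs).filter (· ≠ []) =
      (psplit (fun c => c ∈ ['*','/','+','-']) cs).filter (· ≠ []) := by
  have hexp : toksA pvArith cs =
      ((((mySplit ['*','*'] cs).flatMap (psplit (fun x => x = '*'))).flatMap
          (psplit (fun x => x = '/'))).flatMap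
        (psplit (fun x => x = '+'))).flatMap (psplit (fun x => x = '-')) := by
    simp only [pvArith, toksA, mySplit_single, List.flatMap_assoc, List.flatMap_singleton']
  rw [hexp]
  have e1 : ((mySplit ['*','*'] cs).flatMap (psplit (fun x => x = '*'))).filter (· ≠ [])
      = (psplit (fun x => x = '*') cs).filter (· ≠ []) := starF cs
  have e2 := filter_flatMap_congr (fun x => x = '/') _ _ e1
  rw [psplit_compose] at e2
  have e3 := filter_flatMap_congr (fun x => x = '+') _ _ e2
  rw [psplit_compose] at e3
  have e4 := filter_flatMap_congr (fun x => x = '-') _ _ e3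
  rw [psplit_compose] at e4
  rw [e4, psplit_congr _ (fun c => c ∈ ['*','/','+','-']) (by
    intro c
    simp only [List.mem_cons, List.not_mem_nil, or_false]
    tauto)]


-- ---- replace("(","") as a filter ----
def noPar (c : Char) : Bool := !(decide (c = '(') || decide (c = ')'))
theorem replace_go_spec (c : Char) :
    ∀ (fuel : Nat) (l acc : List Char), l.length ≤ fuel →
      PySem.Chars.replace.go [c] [] fuel l acc = acc.reverse ++ l.filter (fun x => x ≠ c) := by
  intro fuel
  induction fuel with
  | zero =>
    intro l acc h
    have hl : l = [] := List.eq_nil_iff_length_eq_zero.mpr (Nat.le_zero.mp h)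
    subst hl
    rfl
  | succ fuel ih =>
    intro l acc h
    cases l with
    | nil =>
      rw [show PySem.Chars.replace.go [c] [] (fuel+1) [] acc = acc.reverse from rfl]
      simp
    | cons x t =>
      have e : PySem.Chars.replace.go [c] [] (fuel+1) (x :: t) acc =
          if [c].isPrefixOf (x :: t) then
            PySem.Chars.replace.go [c] [] fuel ((x :: t).drop 1) acc
          else PySem.Chars.replace.go [c] [] fuel t (x :: acc) := rfl
      rw [e]
      have hlen : t.length ≤ fuel := by simp only [List.length_cons] at h; omega
      by_cases hx : x = c
      · rw [if_pos (by simp [List.isPrefixOf, hx]), List.drop_one, List.tail_cons, ih t acc hlen]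
        simp [hx]
      · rw [if_neg (by simp [List.isPrefixOf]; exact fun hc => absurd hc.symm hx), ih t (x :: acc) hlen]
        simp [hx]

theorem replace_single (l : List Char) (c : Char) :
    PySem.Chars.replace l [c] [] = l.filter (fun x => x ≠ c) := by
  have e : PySem.Chars.replace l [c] [] = PySem.Chars.replace.go [c] [] l.length l [] := rfl
  rw [e, replace_go_spec c l.length l [] le_rfl]
  rfl

theorem clean_eq_filter (s : String) :
    pvClean s = s.toList.filter noPar := by
  have h1 : pvClean s
      = PySem.Chars.replace (PySem.Chars.replace s.toList ['('] []) [')'] [] := by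
    simp [pvClean, PySem.Str.toList_replace]
  rw [h1, replace_single, replace_single, List.filter_filter]
  apply List.filter_congr
  intro x _
  by_cases h1 : x = '(' <;> by_cases h2 : x = ')' <;> simp [noPar, h1, h2]

-- ---- strip is idempotent ----
theorem dropWhile_idem (p : Char → Bool) (l : List Char) :
    (l.dropWhile p).dropWhile p = l.dropWhile p := by
  induction l with
  | nil => rfl
  | cons c t ih =>
    by_cases hc : p c
    · simp [List.dropWhile_cons, hc, ih]
    · simp [List.dropWhile_cons, hc]

theorem dropWhile_of_prefix (p : Char → Bool) (z w : List Char)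
    (hz : z.dropWhile p = z) (hw : w <+: z) : w.dropWhile p = w := by
  cases w with
  | nil => rfl
  | cons c t =>
    cases z with
    | nil => exact absurd (List.prefix_nil.mp hw) (by simp)
    | cons d u =>
      have hcd : c = d := by
        obtain ⟨r, hr⟩ := hw
        exact (List.cons_eq_cons.mp hr.symm).1.symm
      subst hcd
      have hpc : p c = false := by
        by_cases hp : p c
        · rw [List.dropWhile_cons_of_pos hp] at hz
          have := congrArg List.length hz
          have hle := List.length_dropWhile_le p u
          simp at this
          omega
        · simpa using hp
      simp [List.dropWhile_cons, hpc]

theorem rstrip_prefix (z : List Char) : PySem.Chars.rstrip z <+: z := by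
  have h : (z.reverse.dropWhile PySem.Chars.isspace) <:+ z.reverse := List.dropWhile_suffix _
  have := List.reverse_prefix.mpr (by simpa using h)
  simpa [PySem.Chars.rstrip] using this

theorem strip_idem (l : List Char) :
    PySem.Chars.strip (PySem.Chars.strip l) = PySem.Chars.strip l := by
  unfold PySem.Chars.strip
  have hl : PySem.Chars.lstrip (PySem.Chars.lstrip l) = PySem.Chars.lstrip l :=
    dropWhile_idem _ l
  have hlr : PySem.Chars.lstrip (PySem.Chars.rstrip (PySem.Chars.lstrip l))
      = PySem.Chars.rstrip (PySem.Chars.lstrip l) :=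
    dropWhile_of_prefix _ _ _ hl (rstrip_prefix _)
  rw [hlr]
  unfold PySem.Chars.rstrip
  rw [List.reverse_reverse, dropWhile_idem]


-- ---- per-char bridges between B's regex pieces and A's float() helpers ----
theorem bDig_eq (c : Char) : bDig c = pvDigit c := by
  simp only [bDig, pvDigit, Char.le_def, UInt32.le_iff_toNat_le]
  rfl

theorem bSkipSign_eq (l : List Char) : bSkipSign l = pvDropSign l := by
  cases l with
  | nil => rfl
  | cons c r =>
    simp only [bSkipSign, pvDropSign]
    by_cases h : c = '+' ∨ c = '-'
    · rw [if_pos h, if_pos (by rcases h with h | h <;> simp [h])]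
    · rw [if_neg h, if_neg (by push_neg at h; simp [h.1, h.2])]

theorem bFoldCase_eq (c : Char) : bFoldCase c = PySem.Chars.lowerChar c := by
  simp only [bFoldCase, PySem.Chars.lowerChar, PySem.Chars.isupper]
  by_cases h : 65 ≤ c.toNat ∧ c.toNat ≤ 90
  · rw [if_pos h, if_pos (by simp [Char.le_def, UInt32.le_iff_toNat_le]; omega)]
  · rw [if_neg h, if_neg (by simp [Char.le_def, UInt32.le_iff_toNat_le]; omega)]

theorem map_bFoldCase (l : List Char) : l.map bFoldCase = PySem.Chars.lower l :=
  List.map_congr_left (fun c _ => bFoldCase_eq c)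

-- ---- pvSplitOnce characterization ----
theorem splitOnce_none (p : Char → Bool) (l : List Char) (h : ∀ c ∈ l, p c = false) :
    pvSplitOnce p l = none := by
  induction l with
  | nil => rfl
  | cons c t ih =>
    rw [pvSplitOnce, if_neg (by simp [h c List.mem_cons_self]),
      ih (fun x hx => h x (List.mem_cons_of_mem _ hx))]
    rfl

theorem splitOnce_app (p : Char → Bool) (a : List Char) (c : Char) (b : List Char)
    (ha : ∀ x ∈ a, p x = false) (hc : p c = true) :
    pvSplitOnce p (a ++ c :: b) = some (a, b) := by
  induction a with
  | nil => simp [pvSplitOnce, hc]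
  | cons x t ih =>
    rw [List.cons_append, pvSplitOnce, if_neg (by simp [ha x List.mem_cons_self]),
      ih (fun y hy => ha y (List.mem_cons_of_mem _ hy))]
    rfl

theorem splitOnce_some (p : Char → Bool) : ∀ {l a b : List Char},
    pvSplitOnce p l = some (a, b) →
    ∃ c, p c = true ∧ l = a ++ c :: b ∧ ∀ x ∈ a, p x = false := by
  intro l
  induction l with
  | nil => intro a b h; exact absurd h (by simp [pvSplitOnce])
  | cons x t ih =>
    intro a b h
    rw [pvSplitOnce] at h
    by_cases hx : p x
    · rw [if_pos hx] at h
      obtain ⟨ha, hb⟩ : [] = a ∧ t = b := by simpa using h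
      subst ha; subst hb
      exact ⟨x, hx, rfl, by simp⟩
    · rw [if_neg hx] at h
      cases hr : pvSplitOnce p t with
      | none => rw [hr] at h; simp at h
      | some r =>
        rw [hr] at h
        obtain ⟨r1, r2⟩ := r
        obtain ⟨ha, hb⟩ : x :: r1 = a ∧ r2 = b := by simpa using h
        subst ha; subst hb
        obtain ⟨c, hc, hteq, hall⟩ := ih hr
        refine ⟨c, hc, by rw [hteq]; simp, ?_⟩
        intro y hy
        rcases List.mem_cons.mp hy with rfl | hy
        · simpa using hx
        · exact hall y hy

-- ---- digit-run correspondences ----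
def headStop (rest : List Char) : Prop :=
  match rest with
  | [] => True
  | c :: _ => bDig c = false ∧ c ≠ '_'

theorem bRunT_cons_dig {c : Char} {r : List Char} (h : bDig c = true) :
    bRunT (c :: r) = bRunT r := by
  rw [bRunT.eq_def]; simp [h]

theorem bRunT_us_dig {d : Char} {r2 : List Char} (h : bDig d = true) :
    bRunT ('_' :: d :: r2) = bRunT r2 := by
  rw [bRunT.eq_def]; simp [h, (by decide : bDig '_' = false)]

theorem bRunT_stop {c : Char} {r : List Char} (h1 : bDig c = false) (h2 : c ≠ '_') :
    bRunT (c :: r) = c :: r := by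
  rw [bRunT.eq_def]; simp [h1, h2]

theorem pvUT_other {c : Char} {r : List Char} (h : c ≠ '_') :
    pvUIntTail (c :: r) = (pvDigit c && pvUIntTail r) := by
  rw [pvUIntTail.eq_def]; simp [h]

theorem runT_append : ∀ (t : List Char), pvUIntTail t = true → ∀ (rest : List Char),
    headStop rest → bRunT (t ++ rest) = rest := by
  intro t
  induction t using pvUIntTail.induct with
  | case1 =>
    intro _ rest hr
    cases rest with
    | nil => rfl
    | cons c r => exact bRunT_stop hr.1 hr.2
  | case2 => intro h; exact absurd h (by decide)
  | case3 c r ih =>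
    intro h rest hr
    have h0 : (pvDigit c && pvUIntTail r) = true := h
    simp only [Bool.and_eq_true] at h0
    simp only [List.cons_append]
    rw [bRunT_us_dig (by rw [bDig_eq]; exact h0.1)]
    exact ih h0.2 rest hr
  | case4 c rest0 hne ih =>
    intro h rest hr
    rw [pvUT_other (fun hc => hne hc)] at h
    simp only [Bool.and_eq_true] at h
    simp only [List.cons_append]
    rw [bRunT_cons_dig (by rw [bDig_eq]; exact h.1)]
    exact ih h.2 rest hr

theorem run_append (d : List Char) (rest : List Char) (hd : pvUInt d = true)
    (hr : headStop rest) : bRun (d ++ rest) = some rest := by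
  cases d with
  | nil => simp [pvUInt] at hd
  | cons c t =>
    have hd0 : (pvDigit c && pvUIntTail t) = true := hd
    simp only [Bool.and_eq_true] at hd0
    rw [List.cons_append, bRun, if_pos (by rw [bDig_eq]; exact hd0.1),
      runT_append t hd0.2 rest hr]

theorem runT_struct : ∀ (l : List Char), ∃ d, l = d ++ bRunT l ∧ pvUIntTail d = true := by
  intro l
  induction l using bRunT.induct with
  | case1 => exact ⟨[], rfl, rfl⟩
  | case2 c r hdig ih =>
    obtain ⟨d, hd, hu⟩ := ih
    have hc : c ≠ '_' := fun h => by subst h; exact absurd hdig (by decide)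
    refine ⟨c :: d, ?_, ?_⟩
    · rw [bRunT_cons_dig hdig, List.cons_append, ← hd]
    · rw [pvUT_other hc]
      simp [← bDig_eq, hdig, hu]
  | case3 d0 r2 hdig _ ih =>
    obtain ⟨d, hd, hu⟩ := ih
    refine ⟨'_' :: d0 :: d, ?_, ?_⟩
    · rw [bRunT_us_dig hdig, List.cons_append, List.cons_append, ← hd]
    · show (pvDigit d0 && pvUIntTail d) = true
      simp [← bDig_eq, hdig, hu]
  | case4 d0 r2 hdig _ =>
    refine ⟨[], ?_, rfl⟩
    rw [bRunT.eq_def]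
    simp [(by decide : bDig '_' = false), (by simpa using hdig : bDig d0 = false)]
  | case5 _ =>
    refine ⟨[], ?_, rfl⟩
    rw [bRunT.eq_def]
    simp [(by decide : bDig '_' = false)]
  | case6 c r hdig hne =>
    exact ⟨[], by rw [bRunT_stop (by simpa using hdig) hne]; rfl, rfl⟩

theorem run_struct {l r : List Char} (h : bRun l = some r) :
    ∃ d, l = d ++ r ∧ pvUInt d = true := by
  cases l with
  | nil => simp [bRun] at h
  | cons c t =>
    rw [bRun] at h
    by_cases hc : bDig c
    · rw [if_pos hc] at h
      obtain rfl : bRunT t = r := by simpa using h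
      obtain ⟨d, hd, hu⟩ := runT_struct t
      refine ⟨c :: d, by rw [List.cons_append, ← hd], ?_⟩
      show (pvDigit c && pvUIntTail d) = true
      simp [← bDig_eq, hc, hu]
    · rw [if_neg hc] at h; simp at h

theorem uint_run {d : List Char} (hd : pvUInt d = true) : bRun d = some [] := by
  have := run_append d [] hd trivial
  simpa using this

theorem run_nil_uint {d : List Char} (h : bRun d = some []) : pvUInt d = true := by
  obtain ⟨d', hd, hu⟩ := run_struct h
  rw [List.append_nil] at hd
  subst hd
  exact hu

-- ---- characters of a digit run ----
theorem uintTail_chars : ∀ {d : List Char}, pvUIntTail d = true →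
    ∀ c ∈ d, pvDigit c = true ∨ c = '_' := by
  intro d
  induction d using pvUIntTail.induct with
  | case1 => intro _ c hc; simp at hc
  | case2 => intro h; exact absurd h (by decide)
  | case3 c r ih =>
    intro h x hx
    have h0 : (pvDigit c && pvUIntTail r) = true := h
    simp only [Bool.and_eq_true] at h0
    rcases List.mem_cons.mp hx with rfl | hx
    · exact Or.inr rfl
    · rcases List.mem_cons.mp hx with rfl | hx
      · exact Or.inl h0.1
      · exact ih h0.2 x hx
  | case4 c rest hne ih =>
    intro h x hx
    rw [pvUT_other (fun hc => hne hc)] at h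
    simp only [Bool.and_eq_true] at h
    rcases List.mem_cons.mp hx with rfl | hx
    · exact Or.inl h.1
    · exact ih h.2 x hx

theorem uint_chars {d : List Char} (h : pvUInt d = true) :
    ∀ c ∈ d, pvDigit c = true ∨ c = '_' := by
  cases d with
  | nil => intro c hc; simp at hc
  | cons c t =>
    have h0 : (pvDigit c && pvUIntTail t) = true := h
    simp only [Bool.and_eq_true] at h0
    intro x hx
    rcases List.mem_cons.mp hx with rfl | hx
    · left; exact h0.1
    · exact uintTail_chars h0.2 x hx

theorem char_not_eE {c : Char} (h : pvDigit c = true ∨ c = '_') :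
    ((c == 'e' || c == 'E') = false) := by
  rcases h with h | rfl
  · have h1 : c ≠ 'e' := by rintro rfl; simp [pvDigit] at h
    have h2 : c ≠ 'E' := by rintro rfl; simp [pvDigit] at h
    simp [h1, h2]
  · decide

theorem char_not_dot {c : Char} (h : pvDigit c = true ∨ c = '_') : ((c == '.') = false) := by
  rcases h with h | rfl
  · have h1 : c ≠ '.' := by rintro rfl; simp [pvDigit] at h
    simp [h1]
  · decide

theorem uint_ne_nil {d : List Char} (h : pvUInt d = true) : d ≠ [] := by
  cases d
  · simp [pvUInt] at h
  · simp

-- ---- pvMant introduction and elimination ----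
theorem pvMant_of_uint {d : List Char} (h : pvUInt d = true) : pvMant d = true := by
  unfold pvMant
  rw [splitOnce_none _ _ (fun c hc => char_not_dot (uint_chars h c hc))]
  exact h

theorem pvMant_shape {a b : List Char} (ha : a = [] ∨ pvUInt a = true)
    (hb : b = [] ∨ pvUInt b = true) (hne : ¬(a = [] ∧ b = [])) :
    pvMant (a ++ '.' :: b) = true := by
  unfold pvMant
  rw [splitOnce_app _ a '.' b (fun x hx => by
      rcases ha with rfl | ha
      · simp at hx
      · exact char_not_dot (uint_chars ha x hx)) (by decide)]
  rcases ha with rfl | ha <;> rcases hb with rfl | hb <;>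
    simp_all [List.isEmpty_iff, uint_ne_nil]

theorem pvMant_elim {m : List Char} (h : pvMant m = true) :
    pvUInt m = true ∨ ∃ a b, m = a ++ '.' :: b ∧ (a = [] ∨ pvUInt a = true) ∧
      (b = [] ∨ pvUInt b = true) ∧ ¬(a = [] ∧ b = []) := by
  unfold pvMant at h
  cases hs : pvSplitOnce (· == '.') m with
  | none => rw [hs] at h; exact Or.inl h
  | some ab =>
    obtain ⟨a, b⟩ := ab
    rw [hs] at h
    obtain ⟨c, hc, rfl, _⟩ := splitOnce_some _ hs
    have hcd : c = '.' := by simpa using hc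
    subst hcd
    simp only [Bool.and_eq_true, Bool.not_eq_eq_eq_not, Bool.not_true, Bool.and_eq_false_iff,
      Bool.or_eq_true, List.isEmpty_iff] at h
    right
    refine ⟨a, b, rfl, ?_, ?_, ?_⟩
    · exact h.1.2
    · exact h.2
    · rintro ⟨rfl, rfl⟩
      rcases h.1.1 with h' | h' <;> simp at h'

-- ---- the rest after a mantissa: [] or an exponent head ----
def eStop (rest : List Char) : Prop := rest = [] ∨ ∃ ex, rest = 'e' :: ex ∨ rest = 'E' :: ex

theorem eStop_headStop {rest : List Char} (h : eStop rest) : headStop rest := by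
  rcases h with rfl | ⟨ex, rfl | rfl⟩
  · trivial
  · exact ⟨by decide, by decide⟩
  · exact ⟨by decide, by decide⟩

-- ---- bMantissa introduction (the three mantissa shapes) ----
theorem bMant_shape1 {d rest : List Char} (hd : pvUInt d = true) (hr : eStop rest) :
    bMantissa (d ++ rest) = some rest := by
  unfold bMantissa
  rw [run_append d rest hd (eStop_headStop hr)]
  rcases hr with rfl | ⟨ex, rfl | rfl⟩ <;> rfl

theorem bMant_shape2 {d1 d2 rest : List Char} (h1 : pvUInt d1 = true)
    (h2 : d2 = [] ∨ pvUInt d2 = true) (hr : eStop rest) :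
    bMantissa (d1 ++ '.' :: (d2 ++ rest)) = some rest := by
  unfold bMantissa
  rw [run_append d1 ('.' :: (d2 ++ rest)) h1 ⟨by decide, by decide⟩]
  simp only []
  rcases h2 with rfl | h2
  · simp only [List.nil_append]
    rcases hr with rfl | ⟨ex, rfl | rfl⟩ <;> rfl
  · rw [run_append d2 rest h2 (eStop_headStop hr)]

theorem bMant_shape3 {d2 rest : List Char} (h2 : pvUInt d2 = true) (hr : eStop rest) :
    bMantissa ('.' :: (d2 ++ rest)) = some rest := by
  unfold bMantissa
  rw [show bRun ('.' :: (d2 ++ rest)) = none from by rw [bRun, if_neg (by decide)]]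
  simp only []
  rw [run_append d2 rest h2 (eStop_headStop hr)]

-- ---- bExpOk introduction and elimination ----
theorem bExp_intro {c : Char} {ex : List Char} (hc : c = 'e' ∨ c = 'E')
    (hex : pvUInt (pvDropSign ex) = true) : bExpOk (c :: ex) = true := by
  rw [bExpOk, if_pos hc, bSkipSign_eq, uint_run hex]
  rfl

theorem bExp_elim {r : List Char} (h : bExpOk r = true) :
    r = [] ∨ ∃ c ex, r = c :: ex ∧ (c = 'e' ∨ c = 'E') ∧ pvUInt (pvDropSign ex) = true := by
  cases r with
  | nil => exact Or.inl rfl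
  | cons c ex =>
    rw [bExpOk] at h
    by_cases hc : c = 'e' ∨ c = 'E'
    · rw [if_pos hc] at h
      refine Or.inr ⟨c, ex, rfl, hc, ?_⟩
      rw [bSkipSign_eq] at h
      exact run_nil_uint (by simpa using h)
    · rw [if_neg hc] at h; simp at h

-- ---- bMantissa elimination ----
theorem bMant_elim {t r : List Char} (h : bMantissa t = some r) :
    ∃ M, t = M ++ r ∧ pvMant M = true ∧ ∀ c ∈ M, ((c == 'e' || c == 'E') = false) := by
  unfold bMantissa at h
  cases hb : bRun t with
  | some r0 =>
    rw [hb] at h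
    obtain ⟨d, rfl, hdu⟩ := run_struct hb
    have hdch : ∀ c ∈ d, pvDigit c = true ∨ c = '_' := uint_chars hdu
    cases r0 with
    | nil =>
      obtain rfl : ([] : List Char) = r := by
        have h2 : some ([] : List Char) = some r := h
        simpa using h2
      exact ⟨d, by simp, pvMant_of_uint hdu, fun c hc => char_not_eE (hdch c hc)⟩
    | cons c0 r2 =>
      by_cases hc0 : c0 = '.'
      · subst hc0
        have h2 : (match bRun r2 with | some r3 => some r3 | none => some r2) = some r := h
        cases hb2 : bRun r2 with
        | some r3 =>
          rw [hb2] at h2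
          obtain rfl : r3 = r := by simpa using h2
          obtain ⟨d2, rfl, hd2⟩ := run_struct hb2
          refine ⟨d ++ '.' :: d2, by simp, pvMant_shape (Or.inr hdu) (Or.inr hd2)
            (by rintro ⟨rfl, _⟩; exact uint_ne_nil hdu rfl), ?_⟩
          intro c hc
          rcases List.mem_append.mp hc with hc | hc
          · exact char_not_eE (hdch c hc)
          · rcases List.mem_cons.mp hc with rfl | hc
            · decide
            · exact char_not_eE (uint_chars hd2 c hc)
        | none =>
          rw [hb2] at h2
          obtain rfl : r2 = r := by simpa using h2
          refine ⟨d ++ ['.'], by simp, ?_, ?_⟩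
          · have := pvMant_shape (Or.inr hdu) (Or.inl rfl)
              (by rintro ⟨rfl, _⟩; exact uint_ne_nil hdu rfl)
            simpa using this
          · intro c hc
            rcases List.mem_append.mp hc with hc | hc
            · exact char_not_eE (hdch c hc)
            · rcases List.mem_singleton.mp hc with rfl
              decide
      · have h2 : (match c0 :: r2 with
            | '.' :: x => (match bRun x with | some r3 => some r3 | none => some x)
            | _ => some (c0 :: r2)) = some r := h
        rw [show (match c0 :: r2 with
            | '.' :: x => (match bRun x with | some r3 => some r3 | none => some x)
            | _ => some (c0 :: r2)) = some (c0 :: r2) from by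
          split
          · rename_i x heq
            exact absurd (List.cons_eq_cons.mp heq).1 hc0
          · rfl] at h2
        obtain rfl : c0 :: r2 = r := by simpa using h2
        exact ⟨d, rfl, pvMant_of_uint hdu, fun c hc => char_not_eE (hdch c hc)⟩
  | none =>
    rw [hb] at h
    cases t with
    | nil => simp at h
    | cons c0 t2 =>
      by_cases hc0 : c0 = '.'
      · subst hc0
        have h2 : bRun t2 = some r := h
        obtain ⟨d2, rfl, hd2⟩ := run_struct h2
        refine ⟨'.' :: d2, by simp, ?_, ?_⟩
        · have := pvMant_shape (a := []) (Or.inl rfl) (Or.inr hd2)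
            (by rintro ⟨_, rfl⟩; exact uint_ne_nil hd2 rfl)
          simpa using this
        · intro c hc
          rcases List.mem_cons.mp hc with rfl | hc
          · decide
          · exact char_not_eE (uint_chars hd2 c hc)
      · exfalso
        have h2 : (match c0 :: t2 with
            | '.' :: r2 => bRun r2
            | _ => none) = some r := h
        rw [show (match c0 :: t2 with
            | '.' :: r2 => bRun r2
            | _ => none) = none from by
          split
          · rename_i x heq
            exact absurd (List.cons_eq_cons.mp heq).1 hc0
          · rfl] at h2
        simp at h2

-- ---- A's post-sign recognizer body and the equivalence of the two recognizers ----
def aExp (cs : List Char) : Bool :=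
  match pvSplitOnce (fun c => c == 'e' || c == 'E') cs with
  | none => pvMant cs
  | some (m, ex) => pvMant m && pvUInt (pvDropSign ex)

theorem core_to_aExp {t : List Char} (h : bNumCore t = true) : aExp t = true := by
  unfold bNumCore at h
  cases hm : bMantissa t with
  | none => rw [hm] at h; simp at h
  | some r =>
    rw [hm] at h
    obtain ⟨M, rfl, hM, hMe⟩ := bMant_elim hm
    rcases bExp_elim h with rfl | ⟨c, ex, rfl, hc, hex⟩
    · unfold aExp
      rw [List.append_nil, splitOnce_none _ _ hMe]
      exact hM
    · unfold aExp
      rw [splitOnce_app _ M c ex hMe (by rcases hc with rfl | rfl <;> rfl)]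
      simp [hM, hex]

theorem aExp_to_core {t : List Char} (h : aExp t = true) : bNumCore t = true := by
  unfold aExp at h
  have main : ∀ (m rest : List Char), pvMant m = true → eStop rest →
      bMantissa (m ++ rest) = some rest := by
    intro m rest hm hr
    rcases pvMant_elim hm with hu | ⟨a, b, rfl, ha, hb, hne⟩
    · exact bMant_shape1 hu hr
    · rcases ha with rfl | ha
      · have hbne : b ≠ [] := fun hb0 => hne ⟨rfl, hb0⟩
        rcases hb with rfl | hb
        · exact absurd rfl hbne
        · simpa using bMant_shape3 hb hr
      · have := bMant_shape2 ha hb hr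
        simpa using this
  cases hs : pvSplitOnce (fun c => c == 'e' || c == 'E') t with
  | none =>
    rw [hs] at h
    have := main t [] h (Or.inl rfl)
    rw [List.append_nil] at this
    unfold bNumCore
    rw [this]
    rfl
  | some me =>
    obtain ⟨m, ex⟩ := me
    rw [hs] at h
    simp only [Bool.and_eq_true] at h
    obtain ⟨c, hc, rfl, _⟩ := splitOnce_some _ hs
    have hce : c = 'e' ∨ c = 'E' := by
      rcases Bool.or_eq_true_iff.mp hc with h' | h'
      · exact Or.inl (by simpa using h')
      · exact Or.inr (by simpa using h')
    have hstep := main m (c :: ex) h.1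
      (Or.inr ⟨ex, by rcases hce with rfl | rfl
                      · exact Or.inl rfl
                      · exact Or.inr rfl⟩)
    unfold bNumCore
    rw [hstep]
    show bExpOk (c :: ex) = true
    exact bExp_intro hce h.2

theorem core_eq_aExp (t : List Char) : bNumCore t = aExp t := by
  cases h : aExp t
  · cases h2 : bNumCore t
    · rfl
    · have := core_to_aExp h2
      rw [h] at this
      exact this.symm
  · exact aExp_to_core h

theorem bIsFloat_eq (tok : List Char) : bIsFloat tok = pvNum (pvDropSign tok) := by
  unfold bIsFloat pvNum
  rw [bSkipSign_eq, core_eq_aExp, map_bFoldCase]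
  unfold aExp
  cases pvSplitOnce (fun c => c == 'e' || c == 'E') (pvDropSign tok) with
  | none =>
    simp only []
    cases PySem.Chars.lower (pvDropSign tok) == "inf".toList <;>
      cases PySem.Chars.lower (pvDropSign tok) == "infinity".toList <;>
        cases PySem.Chars.lower (pvDropSign tok) == "nan".toList <;>
          cases pvMant (pvDropSign tok) <;> rfl
  | some me =>
    obtain ⟨m, ex⟩ := me
    simp only []
    cases PySem.Chars.lower (pvDropSign tok) == "inf".toList <;>
      cases PySem.Chars.lower (pvDropSign tok) == "infinity".toList <;>
        cases PySem.Chars.lower (pvDropSign tok) == "nan".toList <;>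
          cases (pvMant m && pvUInt (pvDropSign ex)) <;> rfl

theorem pick_eq : pickOf bIsFloat = pickOf is_number := by
  funext v
  unfold pickOf
  have hq : bIsFloat (PySem.Chars.strip v) = is_number (PySem.Chars.strip v) := by
    rw [is_number, strip_idem, bIsFloat_eq]
  rw [hq]

-- ---- B's scan: parentheses are skipped, operators flush ----
def stepB : PySem.Set (List Char) × List Char → Char → PySem.Set (List Char) × List Char :=
  fun z c =>
    if c = '*' ∨ c = '/' ∨ c = '+' ∨ c = '-' then
      (if PySem.Chars.strip z.2 ≠ [] ∧ bIsFloat (PySem.Chars.strip z.2) = false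
        then PySem.Set.add z.1 (PySem.Chars.strip z.2) else z.1, [])
    else if c = '(' ∨ c = ')' then z
    else (z.1, z.2 ++ [c])

def stepNP : PySem.Set (List Char) × List Char → Char → PySem.Set (List Char) × List Char :=
  fun st ch =>
    if ch = '*' ∨ ch = '/' ∨ ch = '+' ∨ ch = '-' then (flushOf bIsFloat st.1 st.2, ([] : List Char))
    else (st.1, st.2 ++ [ch])

theorem skip_parens : ∀ (l : List Char) (z : PySem.Set (List Char) × List Char),
    l.foldl stepB z = (l.filter noPar).foldl stepNP z := by
  intro l
  induction l with
  | nil => intro z; rfl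
  | cons c t ih =>
    intro z
    by_cases hop : c = '*' ∨ c = '/' ∨ c = '+' ∨ c = '-'
    · have hnp : noPar c = true := by rcases hop with rfl | rfl | rfl | rfl <;> decide
      have hstep : stepB z c = stepNP z c := by
        unfold stepB stepNP flushOf
        rw [if_pos hop, if_pos hop]
      rw [List.foldl_cons, List.filter_cons_of_pos hnp, List.foldl_cons, ih, hstep]
    · by_cases hpar : c = '(' ∨ c = ')'
      · have hnp : noPar c = false := by rcases hpar with rfl | rfl <;> decide
        rw [List.foldl_cons, List.filter_cons_of_neg (by simp [hnp]),
          show stepB z c = z from by unfold stepB; rw [if_neg hop, if_pos hpar], ih]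
      · have hnp : noPar c = true := by
          push_neg at hpar
          simp [noPar, hpar.1, hpar.2]
        have hstep : stepB z c = stepNP z c := by
          unfold stepB stepNP
          rw [if_neg hop, if_neg hpar, if_neg hop]
        rw [List.foldl_cons, List.filter_cons_of_pos hnp, List.foldl_cons, ih, hstep]

-- ===== VERDICT (by name: the statement is the Claim_ definition above) =====
theorem get_variables_in_func_str_spec : Claim_equal_get_variables_in_func_str := by
  intro s _
  unfold Spec_get_variables_in_func_str
  have hne : ∀ sym ∈ pvArith, sym ≠ [] := by decide
  have hA : get_variables_in_func_str s
      = ((pvResolveRec pvArith (pvClean s) PySem.Set.empty).foldl (flushOf is_number)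
          PySem.Set.empty).map String.ofList := rfl
  have hB : get_variables_in_func_str_alt s
      = (((s.toList ++ ['*']).foldl stepB (PySem.Set.empty, [])).1).map String.ofList := rfl
  have hstar : ∀ r : PySem.Set (List Char) × List Char,
      (stepNP r '*').1 = flushOf bIsFloat r.1 r.2 := fun r => by
    unfold stepNP; rw [if_pos (Or.inl rfl)]
  have hloop : flushOf bIsFloat
        ((s.toList.filter noPar).foldl stepNP (PySem.Set.empty, [])).1
        ((s.toList.filter noPar).foldl stepNP (PySem.Set.empty, [])).2
      = (preH [] (psplit (fun c => c = '*' ∨ c = '/' ∨ c = '+' ∨ c = '-')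
          (s.toList.filter noPar))).foldl (flushOf bIsFloat) PySem.Set.empty :=
    loopB (fun c => c = '*' ∨ c = '/' ∨ c = '+' ∨ c = '-') (flushOf bIsFloat)
      (s.toList.filter noPar) PySem.Set.empty []
  rw [hA, hB, skip_parens, List.filter_append,
    show List.filter noPar ['*'] = ['*'] from rfl, List.foldl_append,
    List.foldl_cons, List.foldl_nil, hstar, hloop,
    preH_nil_eq _ (psplit_ne_nil _ _), foldl_flush bIsFloat, pick_eq,
    psplit_congr (fun c => c = '*' ∨ c = '/' ∨ c = '+' ∨ c = '-')
      (fun c => c ∈ ['*','/','+','-'])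
      (by intro c; simp only [List.mem_cons, List.not_mem_nil, or_false])]
  rw [resolve_toks pvArith hne, foldl_flush is_number]
  have ofl : ∀ (M : List (List Char)), M.foldl PySem.Set.add PySem.Set.empty = PySem.Set.ofList M :=
    fun M => (PySem.Set.ofList_eq_foldl M).symm
  simp only [ofl]
  rw [ofList_filterMap_ofList, filterMap_pick_filter _ (toksA pvArith (pvClean s)), toks_eq,
    ← filterMap_pick_filter, clean_eq_filter]
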